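-- pv_equiv track=rewrite | github.com/Kaustubhbajpai7777/ACC45DAYSOFCODE-2024 | D-3.EZSPEAK.py | is_easy_to_pronounce
-- ===== SOURCE A (Python) =====
-- def is_easy_to_pronounce(s):
--     vowels = {'a', 'e', 'i', 'o', 'u'}
--     consecutive_consonants = 0
--
--     for char in s:
--         if char in vowels:
--             consecutive_consonants = 0  # Reset count on vowel
--         else:
--             consecutive_consonants += 1  # Increment on consonant
--
--             if consecutive_consonants >= 4:
--                 return "NO"  # Hard to pronounce
--
--     return "YES"  # Easy to pronounce
-- ===== SOURCE B (Python) =====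
-- def is_easy_to_pronounce(s):
--     vowels = {'a', 'e', 'i', 'o', 'u'}
--     i = 0
--     n = len(s)
--     while i < n:
--         key = s[i] in vowels
--         j = i
--         while j < n and (s[j] in vowels) == key:
--             j += 1
--         if not key and j - i >= 4:
--             return "NO"
--         i = j
--     return "YES"
-- ===== Notes on version B (the rewrite author's own statement) =====
-- stated objective: alternative
-- what changed: B decomposes the string into maximal runs of same vowel-ness (a hand-rolled groupby/span scan over indices) and rejects when a consonant run has length >= 4, instead of A's per-character counter with reset.
import Mathlib
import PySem

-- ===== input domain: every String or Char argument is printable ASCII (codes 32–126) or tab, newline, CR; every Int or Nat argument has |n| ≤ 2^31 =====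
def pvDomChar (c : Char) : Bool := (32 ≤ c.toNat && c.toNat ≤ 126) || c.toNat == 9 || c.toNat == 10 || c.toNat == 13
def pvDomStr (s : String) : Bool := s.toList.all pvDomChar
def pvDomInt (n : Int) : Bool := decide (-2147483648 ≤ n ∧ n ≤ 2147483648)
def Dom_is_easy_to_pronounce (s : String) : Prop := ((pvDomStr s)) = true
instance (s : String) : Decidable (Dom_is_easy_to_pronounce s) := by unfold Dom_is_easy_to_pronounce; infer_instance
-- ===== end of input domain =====

-- B replaces A's per-character counter-with-reset by a scan over maximal runs of
-- equal vowel-ness (a hand-rolled groupby), rejecting a consonant run of length ≥ 4.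

-- ===== PORT A =====
-- `char in vowels` for the literal set {'a','e','i','o','u'}
def pvIsVowel (c : Char) : Bool := c = 'a' || c = 'e' || c = 'i' || c = 'o' || c = 'u'

-- A's loop: counter of consecutive consonants, reset on vowel, early "NO" at 4
def pvGoA : List Char → Nat → String
  | [], _ => "YES"
  | c :: rest, k =>
    if pvIsVowel c then pvGoA rest 0
    else if k + 1 ≥ 4 then "NO" else pvGoA rest (k + 1)

def is_easy_to_pronounce (s : String) : String := pvGoA s.toList 0

-- ===== PORT B =====
-- B's outer while-loop: take the maximal run with the same key as the head
-- (the inner while-loop = takeWhile/dropWhile on the tail), reject a consonant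
-- run of length ≥ 4 (the run is the head plus the matching tail prefix).
def pvGoB : List Char → String
  | [] => "YES"
  | c :: rest =>
    let key := pvIsVowel c
    let run := rest.takeWhile (fun x => pvIsVowel x == key)
    let rest' := rest.dropWhile (fun x => pvIsVowel x == key)
    if key = false ∧ 4 ≤ 1 + run.length then "NO" else pvGoB rest'
termination_by cs => cs.length
decreasing_by
  simpa using Nat.lt_succ_of_le (List.length_dropWhile_le _ rest)

def is_easy_to_pronounce_alt (s : String) : String := pvGoB s.toList

-- ===== PRECONDITION & SPEC =====
def Spec_is_easy_to_pronounce (s : String) (out : String) : Prop := out = is_easy_to_pronounce_alt s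
instance (s : String) (out : String) : Decidable (Spec_is_easy_to_pronounce s out) := by unfold Spec_is_easy_to_pronounce; infer_instance

-- ===== CLAIM (what is proved, stated in full; the proofs are below) =====
def Claim_equal_is_easy_to_pronounce : Prop := ∀ (s : String), Dom_is_easy_to_pronounce s → Spec_is_easy_to_pronounce s (is_easy_to_pronounce s)

-- ===== LEMMAS AND PROOFS =====

-- a run of vowels just keeps resetting A's counter
lemma pvGoA_vowelRun (t : List Char) (rest : List Char)
    (h : ∀ c ∈ t, pvIsVowel c = true) : pvGoA (t ++ rest) 0 = pvGoA rest 0 := by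
  induction t with
  | nil => rfl
  | cons c t ih =>
    have hc : pvIsVowel c = true := h c (List.mem_cons_self ..)
    simp only [List.cons_append, pvGoA, hc, if_true]
    exact ih (fun d hd => h d (List.mem_cons_of_mem _ hd))

-- a run of consonants: the counter just adds the run length, with early "NO" at 4
lemma pvGoA_consRun (t : List Char) (rest : List Char) (k : Nat) (hk : k < 4)
    (h : ∀ c ∈ t, pvIsVowel c = false) :
    pvGoA (t ++ rest) k = if 4 ≤ k + t.length then "NO" else pvGoA rest (k + t.length) := by
  induction t generalizing k with
  | nil => simp [Nat.not_le_of_lt hk]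
  | cons c t ih =>
    have hc : pvIsVowel c = false := h c (List.mem_cons_self ..)
    by_cases h4 : 4 ≤ k + 1
    · have hge : 4 ≤ k + (t.length + 1) := by omega
      simp [pvGoA, hc, h4, hge]
    · have hlt : k + 1 < 4 := by omega
      have hih := ih (k + 1) hlt (fun d hd => h d (List.mem_cons_of_mem _ hd))
      simp only [List.cons_append, pvGoA, hc, Bool.false_eq_true, if_false, ge_iff_le, h4,
        if_false, hih, List.length_cons]
      have he : k + 1 + t.length = k + (t.length + 1) := by omega
      rw [he]

-- the counter value is irrelevant when the list is empty or starts with a vowel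
lemma pvGoA_reset (rest : List Char) (k : Nat)
    (h : rest = [] ∨ ∃ c rest₂, rest = c :: rest₂ ∧ pvIsVowel c = true) :
    pvGoA rest k = pvGoA rest 0 := by
  rcases h with h | ⟨c, rest₂, rfl, hc⟩
  · subst h; rfl
  · simp [pvGoA, hc]

lemma pvDropWhile_head (p : Char → Bool) (l : List Char) :
    l.dropWhile p = [] ∨ ∃ c rest₂, l.dropWhile p = c :: rest₂ ∧ p c = false := by
  cases h : l.dropWhile p with
  | nil => exact Or.inl rfl
  | cons c rest₂ =>
    refine Or.inr ⟨c, rest₂, rfl, ?_⟩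
    have := List.head_dropWhile_not p (l := l) (by simp [h])
    simpa [h] using this

lemma pvGoB_cons (c : Char) (rest : List Char) :
    pvGoB (c :: rest) =
      if pvIsVowel c = false ∧
          4 ≤ 1 + (rest.takeWhile (fun x => pvIsVowel x == pvIsVowel c)).length then "NO"
      else pvGoB (rest.dropWhile (fun x => pvIsVowel x == pvIsVowel c)) := by
  rw [pvGoB]

lemma pvGoA_eq_pvGoB : ∀ (n : Nat) (cs : List Char), cs.length ≤ n → pvGoA cs 0 = pvGoB cs := by
  intro n
  induction n with
  | zero =>
    intro cs h
    have : cs = [] := List.eq_nil_of_length_eq_zero (Nat.le_zero.mp h)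
    subst this; simp [pvGoA, pvGoB]
  | succ n ih =>
    intro cs hlen
    cases cs with
    | nil => simp [pvGoA, pvGoB]
    | cons c rest =>
      have hsplit : rest.takeWhile (fun x => pvIsVowel x == pvIsVowel c)
          ++ rest.dropWhile (fun x => pvIsVowel x == pvIsVowel c) = rest :=
        List.takeWhile_append_dropWhile
      have htake : ∀ d ∈ rest.takeWhile (fun x => pvIsVowel x == pvIsVowel c),
          pvIsVowel d = pvIsVowel c := by
        intro d hd
        have := List.mem_takeWhile_imp hd
        simpa using this
      have hdroplen : (rest.dropWhile (fun x => pvIsVowel x == pvIsVowel c)).length ≤ n := by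
        have := List.length_dropWhile_le (fun x => pvIsVowel x == pvIsVowel c) rest
        simp at hlen; omega
      have hrest' := pvDropWhile_head (fun x => pvIsVowel x == pvIsVowel c) rest
      by_cases hkv : pvIsVowel c = true
      · -- vowel run: both sides skip it
        have hvA : pvGoA (c :: rest) 0
            = pvGoA (rest.dropWhile (fun x => pvIsVowel x == pvIsVowel c)) 0 := by
          have h1 : pvGoA (c :: rest) 0 = pvGoA rest 0 := by simp [pvGoA, hkv]
          have h2 := pvGoA_vowelRun (rest.takeWhile (fun x => pvIsVowel x == pvIsVowel c))
            (rest.dropWhile (fun x => pvIsVowel x == pvIsVowel c))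
            (fun d hd => (htake d hd).trans hkv)
          rw [h1]
          conv_lhs => rw [← hsplit]
          exact h2
        have hvB : pvGoB (c :: rest)
            = pvGoB (rest.dropWhile (fun x => pvIsVowel x == pvIsVowel c)) := by
          rw [pvGoB_cons, if_neg (by simp [hkv])]
        rw [hvA, hvB]
        exact ih _ hdroplen
      · -- consonant run
        have hkf : pvIsVowel c = false := by
          cases h : pvIsVowel c
          · rfl
          · exact absurd h hkv
        have hcons : ∀ d ∈ rest.takeWhile (fun x => pvIsVowel x == pvIsVowel c),
            pvIsVowel d = false := fun d hd => (htake d hd).trans hkf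
        have hA1 : pvGoA (c :: rest) 0 = pvGoA rest 1 := by simp [pvGoA, hkf]
        have hA2 := pvGoA_consRun (rest.takeWhile (fun x => pvIsVowel x == pvIsVowel c))
          (rest.dropWhile (fun x => pvIsVowel x == pvIsVowel c)) 1 (by omega) hcons
        rw [hsplit] at hA2
        rw [hA1, hA2, pvGoB_cons]
        by_cases h4 : 4 ≤ 1 + (rest.takeWhile (fun x => pvIsVowel x == pvIsVowel c)).length
        · rw [if_pos h4, if_pos ⟨hkf, h4⟩]
        · rw [if_neg h4, if_neg (by intro h; exact h4 h.2)]
          have hreset := pvGoA_reset (rest.dropWhile (fun x => pvIsVowel x == pvIsVowel c))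
            (1 + (rest.takeWhile (fun x => pvIsVowel x == pvIsVowel c)).length) ?_
          · rw [hreset]
            exact ih _ hdroplen
          · rcases hrest' with h | ⟨c', r', heq, hpc⟩
            · exact Or.inl h
            · refine Or.inr ⟨c', r', heq, ?_⟩
              simp [hkf] at hpc
              exact hpc

-- ===== VERDICT (by name: the statement is the Claim_ definition above) =====
theorem is_easy_to_pronounce_spec : Claim_equal_is_easy_to_pronounce := by
  intro s _
  unfold Spec_is_easy_to_pronounce is_easy_to_pronounce is_easy_to_pronounce_alt
  exact pvGoA_eq_pvGoB s.toList.length s.toList (le_refl _)
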